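-- pv_equiv track=rewrite | github.com/Cainareiss/sistema-para-lojas-de-auto-pe-as | auto peças.py | calcular_valor_total
-- ===== SOURCE A (Python) =====
-- def calcular_valor_total(produtos):
--         valor_total = 0
--         for produto in produtos:
--             if produto == 1:
--                 valor_total += 50
--             elif produto == 2:
--                 valor_total += 120
--             elif produto == 3:
--                 valor_total += 60
--         return valor_total
-- ===== SOURCE B (Python) =====
-- from collections import Counter
--
-- def calcular_valor_total(produtos):
--     c = Counter(produtos)
--     return 50 * c[1] + 120 * c[2] + 60 * c[3]
-- ===== Notes on version B (the rewrite author's own statement) =====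
-- stated objective: alternative
-- what changed: Replaces the per-element if/elif accumulation with a two-phase tally-then-combine: build a Counter of the codes once, then return a single weighted sum of the three known codes' counts.
import Mathlib
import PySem

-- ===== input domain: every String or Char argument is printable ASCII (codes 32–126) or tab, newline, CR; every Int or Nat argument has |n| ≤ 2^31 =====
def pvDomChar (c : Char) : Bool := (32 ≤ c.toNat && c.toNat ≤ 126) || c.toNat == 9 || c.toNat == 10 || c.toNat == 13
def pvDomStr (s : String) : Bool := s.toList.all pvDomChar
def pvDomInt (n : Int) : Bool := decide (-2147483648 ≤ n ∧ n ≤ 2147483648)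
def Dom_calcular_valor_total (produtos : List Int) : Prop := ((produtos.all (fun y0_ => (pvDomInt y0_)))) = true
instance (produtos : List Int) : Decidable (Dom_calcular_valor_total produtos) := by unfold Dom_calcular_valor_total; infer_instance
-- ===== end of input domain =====

-- B tallies the codes with a Counter and returns one weighted sum of the counts instead of A's per-element if/elif accumulation (alternative decomposition, same cost).


-- ===== PORT A =====
def calcular_valor_total (produtos : List Int) : Int :=
  produtos.foldl (fun valor_total produto =>
    if produto == 1 then valor_total + 50
    else if produto == 2 then valor_total + 120
    else if produto == 3 then valor_total + 60
    else valor_total) 0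

-- ===== PORT B =====
def calcular_valor_total_alt (produtos : List Int) : Int :=
  let c := PySem.Dict.counter produtos
  50 * c.getD 1 0 + 120 * c.getD 2 0 + 60 * c.getD 3 0

-- ===== PRECONDITION & SPEC =====
def Spec_calcular_valor_total (produtos : List Int) (out : Int) : Prop := out = calcular_valor_total_alt produtos
instance (produtos : List Int) (out : Int) : Decidable (Spec_calcular_valor_total produtos out) := by unfold Spec_calcular_valor_total; infer_instance

-- ===== CLAIM (what is proved, stated in full; the proofs are below) =====
def Claim_equal_calcular_valor_total : Prop := ∀ (produtos : List Int), Dom_calcular_valor_total produtos → Spec_calcular_valor_total produtos (calcular_valor_total produtos)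

-- ===== LEMMAS AND PROOFS =====

-- ===== VERDICT (by name: the statement is the Claim_ definition above) =====
theorem pv_shift (produtos : List Int) (acc : Int) :
    produtos.foldl (fun valor_total produto =>
      if produto == 1 then valor_total + 50
      else if produto == 2 then valor_total + 120
      else if produto == 3 then valor_total + 60
      else valor_total) acc
    = acc + 50 * (PySem.List.count produtos 1) + 120 * (PySem.List.count produtos 2)
        + 60 * (PySem.List.count produtos 3) := by
  induction produtos generalizing acc with
  | nil => simp [PySem.List.count]
  | cons x xs ih =>
    simp only [List.foldl_cons, ih, PySem.List.count, List.count_cons]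
    by_cases h1 : x = 1
    · subst h1; simp; ring
    · by_cases h2 : x = 2
      · subst h2; simp; ring
      · by_cases h3 : x = 3
        · subst h3; simp; ring
        · simp [h1, h2, h3]

theorem calcular_valor_total_spec : Claim_equal_calcular_valor_total := by
  intro produtos _
  show calcular_valor_total produtos = calcular_valor_total_alt produtos
  unfold calcular_valor_total calcular_valor_total_alt
  simp only [PySem.Dict.getD_counter]
  rw [pv_shift]
  simp [PySem.List.count]
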